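-- pv_equiv track=rewrite | github.com/rkurdyumov/advent-of-code-2019 | day13.py | get_move_score
-- ===== SOURCE A (Python) =====
-- def get_move_score(output):
--     ball_x = None
--     paddle_x = None
--     score = None
--     for i in range(0, len(output), 3):
--         if output[i + 2] == 4:
--             ball_x = output[i]
--         elif output[i + 2] == 3:
--             paddle_x = output[i]
--         elif (output[i], output[i + 1]) == (-1, 0):
--             score = output[i + 2]
--     dx = paddle_x - ball_x if ball_x and paddle_x else None
--     move = None if not dx else -1 if dx > 0 else +1 if dx < 0 else 0
--     return move, score
-- ===== SOURCE B (Python) =====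
-- def get_move_score(output):
--     ball_x = None
--     paddle_x = None
--     score = None
--     i = len(output) - 3
--     while i >= 0 and (ball_x is None or paddle_x is None or score is None):
--         x, y, tile = output[i], output[i + 1], output[i + 2]
--         if tile == 4:
--             if ball_x is None:
--                 ball_x = x
--         elif tile == 3:
--             if paddle_x is None:
--                 paddle_x = x
--         elif (x, y) == (-1, 0):
--             if score is None:
--                 score = tile
--         i -= 3
--     dx = paddle_x - ball_x if ball_x and paddle_x else None
--     move = None if not dx else -1 if dx > 0 else +1 if dx < 0 else 0
--     return move, score
-- ===== Notes on version B (the rewrite author's own statement) =====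
-- stated objective: alternative
-- what changed: B replaces A's forward index loop that unconditionally overwrites ball/paddle/score with a backward scan from the last triple that fills each slot only if still unset and stops as soon as all three are known; the final move/score expression (including Python truthiness on 0) is kept verbatim.
import Mathlib
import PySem

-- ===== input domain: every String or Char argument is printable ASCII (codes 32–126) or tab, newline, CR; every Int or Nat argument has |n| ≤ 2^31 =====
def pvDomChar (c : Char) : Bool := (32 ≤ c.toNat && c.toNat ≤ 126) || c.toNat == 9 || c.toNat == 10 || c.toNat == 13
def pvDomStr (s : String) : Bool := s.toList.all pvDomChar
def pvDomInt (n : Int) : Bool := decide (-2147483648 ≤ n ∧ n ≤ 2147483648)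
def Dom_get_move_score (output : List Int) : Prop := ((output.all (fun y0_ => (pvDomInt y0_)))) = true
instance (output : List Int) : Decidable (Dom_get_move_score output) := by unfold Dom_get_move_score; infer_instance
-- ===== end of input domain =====

-- B scans the output triples from the LAST group backwards, filling each of the three
-- slots only if still unset and stopping once all three are known (alternative
-- decomposition; same return value). Equivalence is about the return value only.

-- ===== PORT A =====
-- A's loop body: overwrite ball/paddle/score according to the branch that fires.
def pvStepA (st : Option Int × Option Int × Option Int) (x y t : Int) :
    Option Int × Option Int × Option Int :=
  if t = 4 then (some x, st.2.1, st.2.2)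
  else if t = 3 then (st.1, some x, st.2.2)
  else if x = -1 ∧ y = 0 then (st.1, st.2.1, some t)
  else st

-- A's 'for i in range(0, len(output), 3)' loop: walks the list three at a time,
-- front to back, overwriting the state (exact for inputs of length ≡ 0 mod 3,
-- the only inputs admitted by Pre_; elsewhere A raises IndexError).
def pvLoopA : List Int → Option Int × Option Int × Option Int →
    Option Int × Option Int × Option Int
  | x :: y :: t :: rest, st => pvLoopA rest (pvStepA st x y t)
  | _, st => st

def get_move_score (output : List Int) : Option Int × Option Int :=
  let st := pvLoopA output (none, none, none)
  let ball_x := st.1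
  let paddle_x := st.2.1
  let score := st.2.2
  -- dx = paddle_x - ball_x if ball_x and paddle_x else None  (Python truthiness: 0 is falsy)
  let dx : Option Int :=
    match ball_x, paddle_x with
    | some b, some p => if b ≠ 0 ∧ p ≠ 0 then some (p - b) else none
    | _, _ => none
  -- move = None if not dx else -1 if dx > 0 else +1 if dx < 0 else 0
  let move : Option Int :=
    match dx with
    | none => none
    | some d => if d = 0 then none else if d > 0 then some (-1)
                else if d < 0 then some 1 else some 0
  (move, score)

-- ===== PORT B =====
-- B's loop body: fill a slot only if it is still unset.
def pvStepB (st : Option Int × Option Int × Option Int) (x y t : Int) :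
    Option Int × Option Int × Option Int :=
  if t = 4 then (if st.1 = none then (some x, st.2.1, st.2.2) else st)
  else if t = 3 then (if st.2.1 = none then (st.1, some x, st.2.2) else st)
  else if x = -1 ∧ y = 0 then (if st.2.2 = none then (st.1, st.2.1, some t) else st)
  else st

def pvFull (st : Option Int × Option Int × Option Int) : Bool :=
  st.1.isSome && st.2.1.isSome && st.2.2.isSome

-- B's 'while i >= 0 and (ball_x is None or …)' loop, index stepping down by 3.
def pvLoopB (output : List Int) (i : Int)
    (st : Option Int × Option Int × Option Int) :
    Option Int × Option Int × Option Int :=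
  if h : 0 ≤ i ∧ pvFull st = false then
    let x := (PySem.List.pyGet? output i).getD 0
    let y := (PySem.List.pyGet? output (i + 1)).getD 0
    let t := (PySem.List.pyGet? output (i + 2)).getD 0
    pvLoopB output (i - 3) (pvStepB st x y t)
  else st
termination_by (i + 3).toNat
decreasing_by
  omega

def get_move_score_alt (output : List Int) : Option Int × Option Int :=
  let st := pvLoopB output ((output.length : Int) - 3) (none, none, none)
  let ball_x := st.1
  let paddle_x := st.2.1
  let score := st.2.2
  -- dx = paddle_x - ball_x if ball_x and paddle_x else None  (truthiness: None and 0 are falsy)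
  let dx : Option Int :=
    ball_x.bind (fun b => paddle_x.bind (fun p =>
      if b ≠ 0 ∧ p ≠ 0 then some (p - b) else none))
  -- move = None if not dx else -1 if dx > 0 else +1 if dx < 0 else 0
  let move : Option Int :=
    dx.bind (fun d => if d = 0 then none else if d > 0 then some (-1)
      else if d < 0 then some 1 else some 0)
  (move, score)

-- ===== PRECONDITION & SPEC =====
-- A indexes output[i+1], output[i+2] for every group start i < len, so it raises
-- IndexError exactly when len(output) is not a multiple of 3; Pre_ excludes those.
def Pre_get_move_score (output : List Int) : Prop := output.length % 3 = 0
instance (output : List Int) : Decidable (Pre_get_move_score output) := by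
  unfold Pre_get_move_score; infer_instance

def pvWitness_get_move_score : List Int := [1, 0, 4, 2, 0, 3, -1, 0, 17]

def Spec_get_move_score (output : List Int) (out : Option Int × Option Int) : Prop :=
  out = get_move_score_alt output
instance (output : List Int) (out : Option Int × Option Int) :
    Decidable (Spec_get_move_score output out) := by unfold Spec_get_move_score; infer_instance

-- ===== CLAIM (what is proved, stated in full; the proofs are below) =====
def Claim_equal_get_move_score : Prop := ∀ (output : List Int),
  Dom_get_move_score output → Pre_get_move_score output →
  Spec_get_move_score output (get_move_score output)

-- ===== LEMMAS AND PROOFS =====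

-- pointwise Option.or on the three slots ("left wins")
def pvMerge (s t : Option Int × Option Int × Option Int) :
    Option Int × Option Int × Option Int :=
  (s.1.or t.1, s.2.1.or t.2.1, s.2.2.or t.2.2)

theorem pvMerge_none (s : Option Int × Option Int × Option Int) :
    pvMerge s (none, none, none) = s := by
  simp [pvMerge]

theorem pvMerge_assoc (a b c : Option Int × Option Int × Option Int) :
    pvMerge (pvMerge a b) c = pvMerge a (pvMerge b c) := by
  simp [pvMerge, Option.or_assoc]

theorem pvMerge_full (s t : Option Int × Option Int × Option Int)
    (h : pvFull s = true) : pvMerge s t = s := by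
  rcases s with ⟨b, p, c⟩
  cases b <;> cases p <;> cases c <;> simp_all [pvFull, pvMerge]

theorem pvStepA_merge (s : Option Int × Option Int × Option Int) (x y t : Int) :
    pvStepA s x y t = pvMerge (pvStepA (none, none, none) x y t) s := by
  unfold pvStepA pvMerge
  split_ifs <;> rcases s with ⟨b, p, c⟩ <;> simp

theorem pvStepB_merge (s : Option Int × Option Int × Option Int) (x y t : Int) :
    pvStepB s x y t = pvMerge s (pvStepA (none, none, none) x y t) := by
  unfold pvStepB pvStepA pvMerge
  split_ifs <;> rcases s with ⟨b, p, c⟩ <;>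
    cases b <;> cases p <;> cases c <;> simp_all

-- A's fold from an arbitrary state factors through the fold from the empty state.
theorem pvLoopA_init (out : List Int) (s : Option Int × Option Int × Option Int) :
    pvLoopA out s = pvMerge (pvLoopA out (none, none, none)) s := by
  match out with
  | [] => simp [pvLoopA, pvMerge]
  | [a] => simp [pvLoopA, pvMerge]
  | [a, b] => simp [pvLoopA, pvMerge]
  | x :: y :: t :: rest =>
    rw [show pvLoopA (x :: y :: t :: rest) s = pvLoopA rest (pvStepA s x y t) from rfl,
      show pvLoopA (x :: y :: t :: rest) (none, none, none)
          = pvLoopA rest (pvStepA (none, none, none) x y t) from rfl,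
      pvLoopA_init rest (pvStepA s x y t),
      pvLoopA_init rest (pvStepA (none, none, none) x y t),
      pvStepA_merge, pvMerge_assoc]
termination_by out.length
decreasing_by all_goals (simp only [List.length_cons]; omega)

theorem pvLoopB_full (out : List Int) (i : Int)
    (st : Option Int × Option Int × Option Int) (h : pvFull st = true) :
    pvLoopB out i st = st := by
  rw [pvLoopB]
  simp [h]

-- one trailing iteration at index 0
theorem pvLoopB_zero (out : List Int) (st : Option Int × Option Int × Option Int) :
    pvLoopB out 0 st = pvMerge st (pvStepA (none, none, none)
      ((PySem.List.pyGet? out 0).getD 0) ((PySem.List.pyGet? out 1).getD 0)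
      ((PySem.List.pyGet? out 2).getD 0)) := by
  rcases hfull : pvFull st with _ | _
  · rw [pvLoopB, dif_pos ⟨le_refl 0, hfull⟩]
    simp only [zero_add]
    rw [pvLoopB, dif_neg (fun hc => absurd hc.1 (by norm_num)), pvStepB_merge]
  · rw [pvLoopB_full _ _ _ hfull, pvMerge_full _ _ hfull]

theorem pvGet0 (x : Int) (xs : List Int) : PySem.List.pyGet? (x :: xs) 0 = some x :=
  PySem.List.pyGet?_zero_cons x xs

theorem pvGet1 (x y : Int) (xs : List Int) : PySem.List.pyGet? (x :: y :: xs) 1 = some y := by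
  rw [show (1:Int) = ((1:Nat):Int) by norm_num, PySem.List.pyGet?_natCast]
  simp

theorem pvGet2 (x y t : Int) (xs : List Int) : PySem.List.pyGet? (x :: y :: t :: xs) 2 = some t := by
  rw [show (2:Int) = ((2:Nat):Int) by norm_num, PySem.List.pyGet?_natCast]
  simp

theorem pyGet_shift (x y t : Int) (rest : List Int) (i : Int) (h : 0 ≤ i) :
    PySem.List.pyGet? (x :: y :: t :: rest) (i + 3) = PySem.List.pyGet? rest i := by
  obtain ⟨n, rfl⟩ : ∃ n : Nat, i = (n : Int) := ⟨i.toNat, (Int.toNat_of_nonneg h).symm⟩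
  have : (n : Int) + 3 = ((n + 3 : Nat) : Int) := by push_cast; ring
  rw [this, PySem.List.pyGet?_natCast, PySem.List.pyGet?_natCast]
  simp [List.getElem?_cons, Nat.add_comm n 3]

-- shifting the backward scan past the first triple
theorem pvLoopB_shift (x y t : Int) (rest : List Int) (i : Int) (hi : 0 ≤ i)
    (h3 : i % 3 = 0) (st : Option Int × Option Int × Option Int) :
    pvLoopB (x :: y :: t :: rest) (i + 3) st =
      pvMerge (pvLoopB rest i st) (pvStepA (none, none, none) x y t) := by
  rcases hfull : pvFull st with _ | _
  · rw [pvLoopB, dif_pos ⟨by omega, hfull⟩]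
    simp only
    rw [show i + 3 + 1 = (i + 1) + 3 by ring, show i + 3 + 2 = (i + 2) + 3 by ring,
      pyGet_shift _ _ _ _ _ (by omega), pyGet_shift _ _ _ _ _ (by omega),
      pyGet_shift _ _ _ _ _ (by omega), show i + 3 - 3 = i by ring]
    rcases eq_or_lt_of_le hi with hi0 | hpos
    · -- i = 0 : the remaining scan is exactly the trailing iteration on (x,y,t)
      rw [← hi0, pvLoopB_zero]
      conv_rhs => rw [pvLoopB, dif_pos ⟨le_refl 0, hfull⟩]
      simp only [zero_add]
      rw [pvLoopB, dif_neg (fun hc => absurd hc.1 (by norm_num)), pvStepB_merge,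
        pvGet0, pvGet1, pvGet2]
      simp
    · -- i ≥ 3 : one more unfold on both sides, then the recursive call at i - 3
      have h3' : (3 : Int) ≤ i := by omega
      rw [show i = (i - 3) + 3 by ring,
        pvLoopB_shift x y t rest (i - 3) (by omega) (by omega)]
      conv_rhs => rw [pvLoopB, dif_pos ⟨by omega, hfull⟩]
      simp only
      rw [show i - 3 + 3 - 3 = i - 3 by ring]
  · rw [pvLoopB_full _ _ _ hfull, pvLoopB_full _ _ _ hfull, pvMerge_full _ _ hfull]
termination_by i.toNat
decreasing_by omega

-- main invariant: B's backward fill-if-unset scan = A's forward overwrite fold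
theorem pvLoopB_eq (out : List Int) (h3 : out.length % 3 = 0)
    (st : Option Int × Option Int × Option Int) :
    pvLoopB out ((out.length : Int) - 3) st =
      pvMerge st (pvLoopA out (none, none, none)) := by
  match out with
  | [] =>
      rw [show pvLoopA ([] : List Int) (none, none, none) = (none, none, none) from rfl,
        pvMerge_none, show ((([] : List Int).length : Int) - 3) = -3 by simp,
        pvLoopB, dif_neg (fun hc => absurd hc.1 (by norm_num))]
  | [a] => simp at h3
  | [a, b] => simp at h3
  | x :: y :: t :: rest =>
      have hlen : (((x :: y :: t :: rest).length : Int)) = (rest.length : Int) + 3 := by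
        simp; ring
      have hr3 : rest.length % 3 = 0 := by simp at h3; omega
      rw [hlen, show (rest.length : Int) + 3 - 3 = ((rest.length : Int) - 3) + 3 by ring]
      rcases Nat.eq_zero_or_pos rest.length with h0 | hpos
      · have hnil : rest = [] := List.eq_nil_of_length_eq_zero h0
        subst hnil
        rw [show (((([] : List Int).length : Int)) - 3) + 3 = 0 by simp, pvLoopB_zero,
          pvGet0, pvGet1, pvGet2,
          show pvLoopA [x, y, t] (none, none, none)
            = pvStepA (none, none, none) x y t from rfl]
        simp
      · have hr3' : (3 : Nat) ≤ rest.length := by omega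
        rw [pvLoopB_shift x y t rest _ (by omega) (by omega) st,
          pvLoopB_eq rest hr3 st,
          show pvLoopA (x :: y :: t :: rest) (none, none, none)
            = pvLoopA rest (pvStepA (none, none, none) x y t) from rfl,
          pvLoopA_init rest (pvStepA (none, none, none) x y t), pvMerge_assoc]
termination_by out.length
decreasing_by all_goals (simp only [List.length_cons]; omega)

-- ===== VERDICT (by name: the statement is the Claim_ definition above) =====
theorem get_move_score_spec : Claim_equal_get_move_score := by
  intro output _ hpre
  unfold Spec_get_move_score get_move_score get_move_score_alt
  rw [pvLoopB_eq output hpre (none, none, none)]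
  rcases pvLoopA output (none, none, none) with ⟨b, p, c⟩
  cases b <;> cases p <;> cases c <;> simp [pvMerge] <;> split_ifs <;> simp
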